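-- pv_equiv track=rewrite | github.com/speldipn/Algorithm | python/programmers/dictionary/prob4.py | solution
-- ===== SOURCE A (Python) =====
-- def solution(s):
--   answer = ""
--   map = {
--     "zero" :"0",
--     "one"  :"1",
--     "two"  :"2",
--     "three":"3",
--     "four" :"4",
--     "five" :"5",
--     "six"  :"6",
--     "seven":"7",
--     "eight":"8",
--     "nine" :"9"
--   }
--   i = 0
--   while True:
--     if s[i].isnumeric():
--       answer += s[i]
--       i += 1
--     else:
--       for key in map.keys():
--         if s[i:i+len(key)] == key:
--           answer += map[key]
--           i += len(key)
--
--     if i >= len(s):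
--       break
--
--   return int(answer)
-- ===== SOURCE B (Python) =====
-- def solution(s):
--   words = {
--     "zero": 0, "one": 1, "two": 2, "three": 3, "four": 4,
--     "five": 5, "six": 6, "seven": 7, "eight": 8, "nine": 9,
--   }
--   # Scan the string right to left, peeling one token (digit char or digit word)
--   # off the end each step and accumulating its value at the current decimal place.
--   value = 0
--   place = 1
--   n = len(s)
--   while n > 0:
--     c = s[n - 1]
--     if c.isnumeric():
--       value += int(c) * place
--       n -= 1
--     else:
--       for w, d in words.items():
--         if n >= len(w) and s[n - len(w):n] == w:
--           value += d * place
--           n -= len(w)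
--           break
--     place *= 10
--   return value
-- ===== Notes on version B (the rewrite author's own statement) =====
-- stated objective: alternative
-- what changed: B replaces A's forward index scan that concatenates digit characters and parses them with int() at the end by a single right-to-left scan that peels the last token (digit char or digit word) and accumulates its value arithmetically (value += digit * place, place *= 10), never building a string.
import Mathlib
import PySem

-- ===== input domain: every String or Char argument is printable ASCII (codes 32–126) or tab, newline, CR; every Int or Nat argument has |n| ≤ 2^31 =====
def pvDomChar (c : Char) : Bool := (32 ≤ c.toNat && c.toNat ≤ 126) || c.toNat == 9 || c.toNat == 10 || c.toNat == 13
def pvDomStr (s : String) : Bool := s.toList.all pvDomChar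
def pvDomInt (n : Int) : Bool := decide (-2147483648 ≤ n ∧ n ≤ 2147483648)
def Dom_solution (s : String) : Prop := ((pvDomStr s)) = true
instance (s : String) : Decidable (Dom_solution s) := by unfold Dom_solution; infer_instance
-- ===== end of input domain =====

-- B re-implements the decoder as a single right-to-left arithmetic scan (peel the last
-- token, accumulate digit * place), replacing A's forward index walk that builds a digit
-- string and parses it with int() at the end; objective: alternative (no speed claim).

-- ===== PORT A =====
-- the dict literal of A, in insertion order: word ↦ digit character
def numerals : List (List Char × Char) :=
  [(['z','e','r','o'], '0'), (['o','n','e'], '1'), (['t','w','o'], '2'),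
   (['t','h','r','e','e'], '3'), (['f','o','u','r'], '4'), (['f','i','v','e'], '5'),
   (['s','i','x'], '6'), (['s','e','v','e','n'], '7'), (['e','i','g','h','t'], '8'),
   (['n','i','n','e'], '9')]

-- hand port of Python's int(answer): exact for the nonempty digit strings the loop
-- produces on every Pre_ input (no sign/whitespace/underscore ever occurs in answer)
def intOfDigitChars (ds : List Char) : Int :=
  ds.foldl (fun a c => a * 10 + ((c.toNat : Int) - 48)) 0

-- the inner 'for key in map.keys()' loop of A: fold over the dict items mutating (i, answer)
def innerA (cs : List Char) (L : List (List Char × Char)) (st : Nat × List Char) : Nat × List Char :=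
  L.foldl
    (fun st kv =>
      if PySem.List.slice cs (some (st.1 : Int)) (some ((st.1 : Int) + (kv.1.length : Int))) == kv.1
      then (st.1 + kv.1.length, st.2 ++ [kv.2]) else st)
    st

-- the 'while True' loop of A; fuel only runs out where Python's loop never terminates
-- (no token matches at the current position), which is outside Pre_
def loopA (cs : List Char) : Nat → Nat → List Char → List Char
  | 0, _, ans => ans
  | fuel+1, i, ans =>
    match PySem.List.pyGet? cs (i : Int) with
    | none => ans  -- IndexError on s[i]: only the empty string reaches this; outside Pre_
    | some c =>
      let st :=
        if PySem.Chars.strIsdigit [c] then (i + 1, ans ++ [c])  -- s[i].isnumeric(): = isdigit on the ASCII domain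
        else innerA cs numerals (i, ans)
      if cs.length ≤ st.1 then st.2 else loopA cs fuel st.1 st.2

def solution (s : String) : Int :=
  intOfDigitChars (loopA s.toList (s.toList.length + 1) 0 [])

-- ===== PORT B =====
-- the dict literal of Source B, in insertion order: word ↦ digit value
def wordVals : List (List Char × Int) :=
  [(['z','e','r','o'], 0), (['o','n','e'], 1), (['t','w','o'], 2),
   (['t','h','r','e','e'], 3), (['f','o','u','r'], 4), (['f','i','v','e'], 5),
   (['s','i','x'], 6), (['s','e','v','e','n'], 7), (['e','i','g','h','t'], 8),
   (['n','i','n','e'], 9)]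

-- the 'while n > 0' loop of Source B; fuel only runs out where Python's loop never
-- terminates (no token ends at position n), which is outside Pre_
def loopB (cs : List Char) : Nat → Nat → Int → Int → Int
  | 0, _, value, _ => value
  | fuel+1, n, value, place =>
    if n = 0 then value
    else
      let c := (PySem.List.pyGet? cs ((n : Int) - 1)).getD ' '  -- s[n-1]; n ≤ len(s) on every reachable call
      if PySem.Chars.strIsdigit [c] then  -- c.isnumeric(): = isdigit on the ASCII domain
        -- int(c) for a single digit character, exact under the guard
        loopB cs fuel (n - 1) (value + ((c.toNat : Int) - 48) * place) (place * 10)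
      else
        -- 'for w, d in words.items(): if … : …; break' = first pair whose word ends at n
        match wordVals.findSome? (fun wd =>
          if decide (wd.1.length ≤ n) &&
             (PySem.List.slice cs (some ((n : Int) - (wd.1.length : Int))) (some (n : Int)) == wd.1)
          then some wd else none) with
        | some wd => loopB cs fuel (n - wd.1.length) (value + wd.2 * place) (place * 10)
        | none => loopB cs fuel n value (place * 10)

def solution_alt (s : String) : Int :=
  loopB s.toList (s.toList.length + 1) s.toList.length 0 1

-- ===== PRECONDITION & SPEC =====
-- first numeral word (in dict order) that is a prefix of l, with its digit character
def matchW (l : List Char) : Option (List Char × Char) :=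
  numerals.findSome? (fun wd => if wd.1.isPrefixOf l then some wd else none)

-- membership of the string in the token language (digits | the ten digit words)*,
-- by structural recursion on a bound ≥ length so that `decide` can evaluate it
def validF : Nat → List Char → Bool
  | _, [] => true
  | 0, _ :: _ => false
  | b+1, c :: rest =>
    if PySem.Chars.isdigit c then validF b rest
    else
      match matchW (c :: rest) with
      | some wd => validF b ((c :: rest).drop wd.1.length)
      | none => false

def valid (l : List Char) : Bool := validF l.length l

-- Pre_solution: s is nonempty and a concatenation of decimal digit characters and the
-- ten digit words — exactly the inputs on which the Python A returns: on "" A raises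
-- IndexError (s[0]), and on every other string outside this language A's while-loop
-- never terminates (no token matches at some position, so i stops advancing).
def Pre_solution (s : String) : Prop := s.toList ≠ [] ∧ valid s.toList = true
instance (s : String) : Decidable (Pre_solution s) := by unfold Pre_solution; infer_instance

def pvWitness_solution : String := "one4"

def Spec_solution (s : String) (out : Int) : Prop := out = solution_alt s
instance (s : String) (out : Int) : Decidable (Spec_solution s out) := by unfold Spec_solution; infer_instance

-- ===== CLAIM (what is proved, stated in full; the proofs are below) =====
def Claim_equal_solution : Prop := ∀ (s : String), Dom_solution s → Pre_solution s → Spec_solution s (solution s)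

-- ===== LEMMAS AND PROOFS =====

theorem matchW_mem_prefix {l : List Char} {wd : List Char × Char} (h : matchW l = some wd) :
    wd ∈ numerals ∧ wd.1 <+: l := by
  obtain ⟨p, hp, hg⟩ := List.exists_of_findSome?_eq_some h
  by_cases hpre : p.1.isPrefixOf l
  · simp [hpre] at hg
    subst hg
    exact ⟨hp, List.isPrefixOf_iff_prefix.mp hpre⟩
  · simp [hpre] at hg

theorem matchW_key_pos {l : List Char} {wd : List Char × Char} (h : matchW l = some wd) :
    0 < wd.1.length := by
  have hm := (matchW_mem_prefix h).1
  have : ∀ p ∈ numerals, 0 < p.1.length := by decide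
  exact this _ hm

theorem validF_congr : ∀ (f1 : Nat) (l : List Char) (f2 : Nat),
    l.length ≤ f1 → l.length ≤ f2 → validF f1 l = validF f2 l := by
  intro f1
  induction f1 with
  | zero =>
    intro l f2 h1 _
    cases l with
    | nil => cases f2 <;> rfl
    | cons c rest => simp at h1
  | succ g1 ih =>
    intro l f2 h1 h2
    cases l with
    | nil => cases f2 <;> rfl
    | cons c rest =>
      cases f2 with
      | zero => simp at h2
      | succ g2 =>
        rw [validF, validF]
        by_cases hd : PySem.Chars.isdigit c
        · simp only [hd, if_true]
          exact ih rest g2 (by simp at h1; omega) (by simp at h2; omega)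
        · simp only [hd, Bool.false_eq_true, if_false]
          split
          · next wd heq =>
            have hk := matchW_key_pos heq
            refine ih _ g2 ?_ ?_ <;> (simp at h1 h2 ⊢; omega)
          · rfl

theorem valid_cons (c : Char) (rest : List Char) :
    valid (c :: rest) =
      (if PySem.Chars.isdigit c then valid rest
       else
         match matchW (c :: rest) with
         | some wd => valid ((c :: rest).drop wd.1.length)
         | none => false) := by
  show validF (rest.length + 1) (c :: rest) = _
  rw [validF]
  by_cases hd : PySem.Chars.isdigit c
  · simp only [hd, if_true]
    rfl
  · simp only [hd, Bool.false_eq_true, if_false]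
    split
    · next wd heq =>
      have hk := matchW_key_pos heq
      exact validF_congr _ _ _ (by simp; omega) (le_refl _)
    · rfl

-- the digit characters the scan extracts from a valid string
def digsC : List Char → List Char
  | [] => []
  | c :: rest =>
    if PySem.Chars.isdigit c then c :: digsC rest
    else
      match h : matchW (c :: rest) with
      | some wd => wd.2 :: digsC ((c :: rest).drop wd.1.length)
      | none => []
termination_by l => l.length
decreasing_by
  · simp
  · have := matchW_key_pos h
    simp
    omega

theorem strIsdigit_single (c : Char) :
    PySem.Chars.strIsdigit [c] = PySem.Chars.isdigit c := by
  simp [PySem.Chars.strIsdigit]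

-- generic: a guarded findSome? whose guard holds exactly at key w returns w's pair
theorem findSome?_guard_unique {α : Type} (L : List (List Char × α)) (w : List Char) (d : α)
    (g : List Char × α → Bool)
    (hmem : (w, d) ∈ L) (hg : ∀ p ∈ L, g p = true ↔ p.1 = w)
    (hval : ∀ d', (w, d') ∈ L → d' = d) :
    L.findSome? (fun p => if g p then some p else none) = some (w, d) := by
  induction L with
  | nil => simp at hmem
  | cons a t ih =>
    by_cases ha : a.1 = w
    · have hga : g a = true := (hg a (by simp)).mpr ha
      have hv : a.2 = d := hval a.2 (by rw [← ha]; simp)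
      have haw : a = (w, d) := by obtain ⟨a1, a2⟩ := a; simp_all
      subst haw
      simp [List.findSome?, hga]
    · have hga : g a = false := by
        cases hq : g a
        · rfl
        · exact absurd ((hg a (by simp)).mp hq) ha
      simp only [List.findSome?, hga, Bool.false_eq_true, if_false]
      have hmem' : (w, d) ∈ t := by
        rcases List.mem_cons.mp hmem with h | h
        · exact absurd (by rw [← h]) ha
        · exact h
      exact ih hmem' (fun p hp => hg p (by simp [hp])) (fun d' hd' => hval d' (by simp [hd']))

theorem no_cross_prefix {w w' : List Char} {d d' : Char} (hw : (w, d) ∈ numerals)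
    (hw' : (w', d') ∈ numerals) {y : List Char} (h1 : w <+: y) (h2 : w' <+: y) : w = w' := by
  have hnp : ∀ p ∈ numerals, ∀ q ∈ numerals, p.1 ≠ q.1 → ¬ p.1.isPrefixOf q.1 := by decide
  by_contra hne
  rcases List.prefix_or_prefix_of_prefix h1 h2 with h | h
  · exact hnp (w, d) hw (w', d') hw' hne (List.isPrefixOf_iff_prefix.mpr h)
  · exact hnp (w', d') hw' (w, d) hw (Ne.symm hne) (List.isPrefixOf_iff_prefix.mpr h)

theorem numerals_val_unique {w : List Char} {d d' : Char} (h : (w, d) ∈ numerals)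
    (h' : (w, d') ∈ numerals) : d' = d := by
  have : ∀ p ∈ numerals, ∀ q ∈ numerals, p.1 = q.1 → p.2 = q.2 := by decide
  exact this (w, d') h' (w, d) h rfl

theorem matchW_eq_of_prefix {w : List Char} {d : Char} (hm : (w, d) ∈ numerals)
    {l : List Char} (hp : w <+: l) : matchW l = some (w, d) := by
  unfold matchW
  refine findSome?_guard_unique numerals w d _ hm ?_ ?_
  · intro p hpmem
    constructor
    · intro hg
      exact no_cross_prefix hpmem hm (List.isPrefixOf_iff_prefix.mp hg) hp
    · intro he
      exact List.isPrefixOf_iff_prefix.mpr (he ▸ hp)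
  · intro d' hd'
    exact numerals_val_unique hm hd'

theorem valid_digit_cons {c : Char} (h : PySem.Chars.isdigit c = true) (z : List Char) :
    valid (c :: z) = valid z ∧ digsC (c :: z) = c :: digsC z := by
  rw [valid_cons, digsC]
  simp [h]

theorem word_head_not_digit {w : List Char} {d : Char} (h : (w, d) ∈ numerals) :
    ∃ c t, w = c :: t ∧ PySem.Chars.isdigit c = false := by
  have hfact : ∀ p ∈ numerals, p.1 ≠ [] ∧ PySem.Chars.isdigit (p.1.headD 'a') = false := by decide
  obtain ⟨hne, hd⟩ := hfact (w, d) h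
  obtain ⟨c, t, hct⟩ := List.exists_cons_of_ne_nil hne
  subst hct
  exact ⟨c, t, rfl, by simpa using hd⟩

theorem valid_word_append {w : List Char} {d : Char} (h : (w, d) ∈ numerals) (z : List Char) :
    valid (w ++ z) = valid z ∧ digsC (w ++ z) = d :: digsC z := by
  obtain ⟨c, t, hw, hnd⟩ := word_head_not_digit h
  have hpre : w <+: w ++ z := List.prefix_append w z
  have hmw : matchW (w ++ z) = some (w, d) := matchW_eq_of_prefix h hpre
  have hdrop : (w ++ z).drop w.length = z := by simp
  subst hw
  rw [List.cons_append] at hmw hdrop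
  constructor
  · rw [List.cons_append, valid_cons]
    simp only [hnd, Bool.false_eq_true, if_false]
    split
    · next wd heq =>
      rw [hmw] at heq
      cases heq
      simpa using congrArg valid hdrop
    · next heq => rw [hmw] at heq; cases heq
  · rw [List.cons_append, digsC]
    simp only [hnd, Bool.false_eq_true, if_false]
    split
    · next wd heq =>
      rw [hmw] at heq
      cases heq
      simpa using congrArg digsC hdrop
    · next heq => rw [hmw] at heq; cases heq

-- a nonempty valid string decomposes as a valid prefix plus one final token
theorem valid_decomp (p : List Char) (hv : valid p = true) (hne : p ≠ []) :
    ∃ x t dch, p = x ++ t ∧ valid x = true ∧ digsC p = digsC x ++ [dch] ∧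
      ((t = [dch] ∧ PySem.Chars.isdigit dch = true) ∨ (t, dch) ∈ numerals) := by
  generalize hl : p.length = k
  induction k using Nat.strong_induction_on generalizing p with
  | _ k ih =>
  subst hl
  cases p with
  | nil => exact absurd rfl hne
  | cons c rest =>
    rw [valid_cons] at hv
    by_cases hd : PySem.Chars.isdigit c
    · simp only [hd, if_true] at hv
      cases rest with
      | nil =>
        refine ⟨[], [c], c, by simp, rfl, ?_, Or.inl ⟨rfl, hd⟩⟩
        rw [digsC]
        simp [hd, digsC]
      | cons r1 r2 =>
        obtain ⟨x', t, dch, hr, hvx, hdg, hcase⟩ :=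
          ih (r1 :: r2).length (by simp) (r1 :: r2) hv (by simp) rfl
        obtain ⟨e1, e2⟩ := valid_digit_cons hd x'
        refine ⟨c :: x', t, dch, by rw [hr, List.cons_append], by rw [e1]; exact hvx, ?_, hcase⟩
        have hdc := (valid_digit_cons hd (r1 :: r2)).2
        rw [hdc, hdg, e2]
        simp
    · simp only [hd, Bool.false_eq_true, if_false] at hv
      split at hv
      · next wd heq =>
        obtain ⟨hmem, hpre⟩ := matchW_mem_prefix heq
        obtain ⟨rest2, hr⟩ := hpre
        have hdrop : (c :: rest).drop wd.1.length = rest2 := by rw [← hr]; simp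
        rw [hdrop] at hv
        cases rest2 with
        | nil =>
          refine ⟨[], wd.1, wd.2, by rw [← hr]; simp, rfl, ?_, Or.inr (by simpa using hmem)⟩
          have := (valid_word_append hmem []).2
          rw [← hr]
          simpa [digsC] using this
        | cons s1 s2 =>
          have hlen : (s1 :: s2).length < (c :: rest).length := by
            have hk := matchW_key_pos heq
            have hlc := congrArg List.length hr
            rw [List.length_append] at hlc
            omega
          obtain ⟨x', t, dch, hr2, hvx, hdg, hcase⟩ :=
            ih (s1 :: s2).length hlen (s1 :: s2) hv (by simp) rfl
          obtain ⟨w1, w2⟩ := valid_word_append hmem x'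
          refine ⟨wd.1 ++ x', t, dch, ?_, by rw [w1]; exact hvx, ?_, hcase⟩
          · rw [← hr, hr2, List.append_assoc]
          · have hds := (valid_word_append hmem (s1 :: s2)).2
            rw [← hr, hds, hdg, w2]
            simp
      · exact absurd hv (by simp)

-- ===== A-side loop characterization =====

theorem numerals_key_pos : ∀ p ∈ numerals, 0 < p.1.length := by decide

theorem guardA_iff (l : List Char) (i : Nat) (w : List Char) :
    ((PySem.List.slice l (some (i : Int)) (some ((i : Int) + (w.length : Int))) == w) = true)
      ↔ w <+: l.drop i := by
  rw [PySem.List.slice_natCast_add]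
  rw [beq_iff_eq, List.prefix_iff_eq_take]
  exact ⟨fun h => h.symm, fun h => h.symm⟩

theorem loopA_inner (l : List Char) (L : List (List Char × Char))
    (hsub : ∀ p ∈ L, p ∈ numerals) (i : Nat) (ans : List Char)
    (hv : valid (l.drop i) = true) :
    valid (l.drop (innerA l L (i, ans)).1) = true ∧ i ≤ (innerA l L (i, ans)).1 ∧
      ans ++ digsC (l.drop i) = (innerA l L (i, ans)).2 ++ digsC (l.drop (innerA l L (i, ans)).1) ∧
      ((∃ wd ∈ L, wd.1 <+: l.drop i) → i < (innerA l L (i, ans)).1) := by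
  induction L generalizing i ans with
  | nil =>
    refine ⟨hv, le_refl i, rfl, ?_⟩
    rintro ⟨wd, hwd, -⟩
    exact absurd hwd (List.not_mem_nil)
  | cons kv L' ih =>
    have hkv : kv ∈ numerals := hsub kv (by simp)
    have hsub' : ∀ p ∈ L', p ∈ numerals := fun p hp => hsub p (by simp [hp])
    by_cases hg : (PySem.List.slice l (some (i : Int)) (some ((i : Int) + (kv.1.length : Int))) == kv.1) = true
    · have hpre : kv.1 <+: l.drop i := (guardA_iff l i kv.1).mp hg
      obtain ⟨rest, hr⟩ := hpre
      have hkv' : (kv.1, kv.2) ∈ numerals := by simpa using hkv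
      have hva := valid_word_append hkv' rest
      have hdrop' : l.drop (i + kv.1.length) = rest := by
        have h5 : l.drop (i + kv.1.length) = (l.drop i).drop kv.1.length := by
          rw [List.drop_drop, Nat.add_comm]
        rw [h5, ← hr]
        simp
      have hv' : valid (l.drop (i + kv.1.length)) = true := by
        rw [hdrop']
        rw [← hr, hva.1] at hv
        exact hv
      have hge : PySem.List.slice l (some (i : Int)) (some ((i : Int) + (kv.1.length : Int))) = kv.1 := by
        rwa [beq_iff_eq] at hg
      have hred : innerA l (kv :: L') (i, ans) = innerA l L' (i + kv.1.length, ans ++ [kv.2]) := by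
        simp [innerA, hge]
      obtain ⟨a1, a2, a3, a4⟩ := ih hsub' (i + kv.1.length) (ans ++ [kv.2]) hv'
      have hkpos : 0 < kv.1.length := numerals_key_pos kv hkv
      rw [hred]
      refine ⟨a1, by omega, ?_, fun _ => by omega⟩
      rw [← hr, hva.2] at *
      rw [← a3, hdrop', List.append_assoc]
      rfl
    · have hge : ¬ PySem.List.slice l (some (i : Int)) (some ((i : Int) + (kv.1.length : Int))) = kv.1 := by
        intro h
        exact hg (beq_iff_eq.mpr h)
      have hred : innerA l (kv :: L') (i, ans) = innerA l L' (i, ans) := by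
        simp [innerA, hge]
      obtain ⟨a1, a2, a3, a4⟩ := ih hsub' i ans hv
      rw [hred]
      refine ⟨a1, a2, a3, ?_⟩
      rintro ⟨wd, hwdm, hwdp⟩
      apply a4
      rcases List.mem_cons.mp hwdm with h | h
      · exact absurd ((guardA_iff l i kv.1).mpr (h ▸ hwdp)) hg
      · exact ⟨wd, h, hwdp⟩

theorem loopA_eq (l : List Char) (fuel i : Nat) (ans : List Char)
    (hv : valid (l.drop i) = true) (hne : l.drop i ≠ []) (hfuel : l.length - i < fuel) :
    loopA l fuel i ans = ans ++ digsC (l.drop i) := by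
  induction fuel generalizing i ans with
  | zero =>
    have hil : i < l.length := by
      by_contra h
      exact hne (List.drop_eq_nil_iff.mpr (by omega))
    omega
  | succ f ihf =>
    have hil : i < l.length := by
      by_contra h
      exact hne (List.drop_eq_nil_iff.mpr (by omega))
    rw [loopA]
    have hg : PySem.List.pyGet? l (i : Int) = some l[i] := by
      rw [PySem.List.pyGet?_natCast, List.getElem?_eq_getElem hil]
    have hdropcons : l.drop i = l[i] :: l.drop (i + 1) := List.drop_eq_getElem_cons hil
    by_cases hd : PySem.Chars.isdigit l[i] = true
    · simp only [hg, strIsdigit_single, hd, if_true]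
      have hdc := valid_digit_cons hd (l.drop (i + 1))
      have hv' : valid (l.drop (i + 1)) = true := by
        rw [hdropcons, hdc.1] at hv
        exact hv
      have hdig : digsC (l.drop i) = l[i] :: digsC (l.drop (i + 1)) := by
        rw [hdropcons, hdc.2]
      by_cases hbreak : l.length ≤ i + 1
      · simp only [hbreak, if_true]
        rw [hdig, List.drop_eq_nil_iff.mpr hbreak]
        simp [digsC]
      · simp only [hbreak, if_false]
        rw [ihf (i + 1) (ans ++ [l[i]]) hv'
          (fun h => hbreak (List.drop_eq_nil_iff.mp h)) (by omega)]
        rw [hdig, List.append_assoc]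
        rfl
    · have hd' : PySem.Chars.isdigit l[i] = false := by
        rwa [Bool.not_eq_true] at hd
      simp only [hg, strIsdigit_single, hd', Bool.false_eq_true, if_false]
      have hv2 := hv
      rw [hdropcons, valid_cons] at hv2
      simp only [hd', Bool.false_eq_true, if_false] at hv2
      split at hv2
      · next wd heq =>
        obtain ⟨hmem, hpre⟩ := matchW_mem_prefix heq
        rw [← hdropcons] at hpre
        obtain ⟨a1, a2, a3, a4⟩ := loopA_inner l numerals (fun p hp => hp) i ans hv
        have hprog : i < (innerA l numerals (i, ans)).1 := a4 ⟨wd, hmem, hpre⟩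
        by_cases hbreak : l.length ≤ (innerA l numerals (i, ans)).1
        · simp only [hbreak, if_true]
          rw [a3, List.drop_eq_nil_iff.mpr hbreak]
          simp [digsC]
        · simp only [hbreak, if_false]
          rw [ihf _ _ a1 (fun h => hbreak (List.drop_eq_nil_iff.mp h)) (by omega)]
          rw [← a3]
      · exact absurd hv2 (by simp)

-- ===== B-side loop characterization =====

theorem intOfDigitChars_append (ds : List Char) (c : Char) :
    intOfDigitChars (ds ++ [c]) = intOfDigitChars ds * 10 + ((c.toNat : Int) - 48) := by
  simp [intOfDigitChars]

theorem numerals_no_suffix :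
    ∀ pr ∈ numerals, ∀ qr ∈ numerals, pr.1 ≠ qr.1 → ¬ pr.1.isSuffixOf qr.1 = true := by decide

theorem word_last_not_digit :
    ∀ pr ∈ numerals, pr.1 ≠ [] ∧ PySem.Chars.isdigit (pr.1.getLastD 'a') = false := by decide

theorem wordVals_eq :
    wordVals = numerals.map (fun pr => (pr.1, ((pr.2.toNat : Int) - 48))) := by decide

theorem no_cross_suffix {w w' : List Char} {d d' : Char} (hw : (w, d) ∈ numerals)
    (hw' : (w', d') ∈ numerals) {y : List Char} (h1 : w <:+ y) (h2 : w' <:+ y) : w = w' := by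
  by_contra hne
  rcases List.suffix_or_suffix_of_suffix h1 h2 with h | h
  · exact numerals_no_suffix (w, d) hw (w', d') hw' hne (List.isSuffixOf_iff_suffix.mpr h)
  · exact numerals_no_suffix (w', d') hw' (w, d) hw (Ne.symm hne) (List.isSuffixOf_iff_suffix.mpr h)

theorem last_char_take (l : List Char) (n : Nat) (hn : n ≤ l.length) (hpos : 0 < n)
    (x t : List Char) (ht : t ≠ []) (hp : l.take n = x ++ t) :
    (PySem.List.pyGet? l ((n : Int) - 1)).getD ' ' = t.getLast ht := by
  have hcast : ((n : Int) - 1) = ((n - 1 : Nat) : Int) := by omega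
  rw [hcast, PySem.List.pyGet?_natCast]
  rw [show l[n-1]? = (l.take n)[n-1]? from
    (by rw [List.getElem?_take, if_pos (by omega)] : (l.take n)[n-1]? = l[n-1]?).symm]
  rw [hp]
  have hplen : (l.take n).length = n := by rw [List.length_take]; omega
  have hxt : x.length + t.length = n := by
    have h2 := congrArg List.length hp
    rw [hplen, List.length_append] at h2
    omega
  have htpos : 0 < t.length := List.length_pos_of_ne_nil ht
  rw [List.getElem?_append_right (by omega),
    show n - 1 - x.length = t.length - 1 from by omega,
    ← List.getLast?_eq_getElem?, List.getLast?_eq_some_getLast ht]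
  rfl

theorem slice_suffix_eq (l : List Char) (n k : Nat) (hk : k ≤ n) :
    PySem.List.slice l (some ((n : Int) - (k : Int))) (some (n : Int)) = (l.take n).drop (n - k) := by
  have hcast : ((n : Int) - (k : Int)) = ((n - k : Nat) : Int) := by omega
  rw [hcast, PySem.List.slice_natCast, List.drop_take,
    show n - (n - k) = k from by omega]

theorem guard_iff (l : List Char) (n : Nat) (hn : n ≤ l.length) (w : List Char) :
    ((decide (w.length ≤ n) &&
      (PySem.List.slice l (some ((n : Int) - (w.length : Int))) (some (n : Int)) == w)) = true)
      ↔ w <:+ l.take n := by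
  have hplen : (l.take n).length = n := by rw [List.length_take]; omega
  constructor
  · intro h
    simp only [Bool.and_eq_true, decide_eq_true_eq, beq_iff_eq] at h
    obtain ⟨hle, hs⟩ := h
    rw [slice_suffix_eq l n w.length hle] at hs
    rw [List.suffix_iff_eq_drop, hplen]
    exact hs.symm
  · intro hs
    have hle : w.length ≤ n := by
      have := hs.length_le
      omega
    have hdrop : w = (l.take n).drop (n - w.length) := by
      have := List.suffix_iff_eq_drop.mp hs
      rwa [hplen] at this
    simp only [Bool.and_eq_true, decide_eq_true_eq, beq_iff_eq]
    exact ⟨hle, by rw [slice_suffix_eq l n w.length hle, ← hdrop]⟩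

theorem loopB_eq (l : List Char) (fuel n : Nat) (value place : Int)
    (hn : n ≤ l.length) (hv : valid (l.take n) = true) (hfuel : n ≤ fuel) :
    loopB l fuel n value place = value + place * intOfDigitChars (digsC (l.take n)) := by
  induction fuel generalizing n value place with
  | zero =>
    have hn0 : n = 0 := by omega
    subst hn0
    rw [loopB]
    simp [digsC, intOfDigitChars]
  | succ f ihf =>
    rw [loopB]
    by_cases hn0 : n = 0
    · subst hn0
      simp [digsC, intOfDigitChars]
    · simp only [hn0, if_false]
      have hpos : 0 < n := Nat.pos_of_ne_zero hn0
      have hplen : (l.take n).length = n := by rw [List.length_take]; omega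
      have hpne : l.take n ≠ [] := by
        intro h
        rw [h] at hplen
        simp at hplen
        omega
      obtain ⟨x, t, dch, hp, hvx, hdg, hcase⟩ := valid_decomp (l.take n) hv hpne
      have hxt : x.length + t.length = n := by
        have h2 := congrArg List.length hp
        rw [hplen, List.length_append] at h2
        omega
      have hx : l.take (n - t.length) = x := by
        have h3 : (l.take n).take (n - t.length) = x := by
          rw [hp, show n - t.length = x.length from by omega]
          exact List.take_left
        rw [List.take_take, show min (n - t.length) n = n - t.length from by omega] at h3
        exact h3
      cases hcase with
      | inl hdig =>
        obtain ⟨ht, hdchd⟩ := hdig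
        subst ht
        have ht' : [dch] ≠ [] := by simp
        have hlast := last_char_take l n hn hpos x [dch] ht' hp
        simp only [List.getLast_singleton] at hlast
        simp only [hlast, strIsdigit_single, hdchd, if_true]
        have ht1 : ([dch] : List Char).length = 1 := rfl
        rw [ihf (n - 1) _ _ (by omega) (by rw [show n - 1 = n - ([dch] : List Char).length from by omega, hx]; exact hvx) (by omega)]
        rw [show n - 1 = n - ([dch] : List Char).length from by omega, hx, hdg, intOfDigitChars_append]
        ring
      | inr hmem =>
        have ht' : t ≠ [] := (word_last_not_digit (t, dch) hmem).1
        have hlastD := (word_last_not_digit (t, dch) hmem).2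
        have hlast := last_char_take l n hn hpos x t ht' hp
        have hlastdig : PySem.Chars.isdigit ((PySem.List.pyGet? l ((n : Int) - 1)).getD ' ') = false := by
          rw [hlast]
          rw [List.getLastD_eq_getLast?, List.getLast?_eq_some_getLast ht'] at hlastD
          simpa using hlastD
        simp only [strIsdigit_single, hlastdig, Bool.false_eq_true, if_false]
        have hsuf : t <:+ l.take n := hp ▸ List.suffix_append x t
        have hfind : wordVals.findSome? (fun wd =>
            if decide (wd.1.length ≤ n) &&
               (PySem.List.slice l (some ((n : Int) - (wd.1.length : Int))) (some (n : Int)) == wd.1)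
            then some wd else none) = some (t, (dch.toNat : Int) - 48) := by
          refine findSome?_guard_unique wordVals t _ _ ?_ ?_ ?_
          · rw [wordVals_eq]
            exact List.mem_map.mpr ⟨(t, dch), hmem, rfl⟩
          · intro q hqmem
            rw [guard_iff l n hn q.1]
            constructor
            · intro hs
              rw [wordVals_eq] at hqmem
              obtain ⟨r, hr, hre⟩ := List.mem_map.mp hqmem
              have h1 : r.1 = q.1 := congrArg Prod.fst hre
              have h2 : (r.1, r.2) ∈ numerals := by simpa using hr
              rw [← h1]
              exact no_cross_suffix h2 hmem (h1 ▸ hs) hsuf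
            · intro he
              rw [he]
              exact hsuf
          · intro d' hd'
            rw [wordVals_eq] at hd'
            obtain ⟨r, hr, hre⟩ := List.mem_map.mp hd'
            have h1 : r.1 = t := congrArg Prod.fst hre
            have h2 : ((r.2.toNat : Int) - 48) = d' := congrArg Prod.snd hre
            have h3 : (t, r.2) ∈ numerals := by rw [← h1]; simpa using hr
            rw [← h2, numerals_val_unique hmem h3]
        simp only [hfind]
        have htpos : 0 < t.length := List.length_pos_of_ne_nil ht'
        have htle : t.length ≤ n := by omega
        rw [ihf (n - t.length) _ _ (by omega) (by rw [hx]; exact hvx) (by omega)]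
        rw [hx, hdg, intOfDigitChars_append]
        ring

-- ===== VERDICT (by name: the statement is the Claim_ definition above) =====
theorem solution_spec : Claim_equal_solution := by
  intro s _ hpre
  unfold Spec_solution solution solution_alt
  obtain ⟨hne, hv⟩ := hpre
  have hA : loopA s.toList (s.toList.length + 1) 0 [] = digsC s.toList := by
    have := loopA_eq s.toList (s.toList.length + 1) 0 [] (by simpa using hv) (by simpa using hne)
      (by omega)
    simpa using this
  have hB := loopB_eq s.toList (s.toList.length + 1) s.toList.length 0 1 (le_refl _)
    (by rw [List.take_length]; exact hv) (by omega)
  rw [List.take_length] at hB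
  rw [hA, hB]
  ring
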